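-- pv_equiv track=rewrite | github.com/leihchen/leetcode | mac/2022/tiktok.py | recover_2d_prefixsum
-- ===== SOURCE A (Python) =====
-- def recover_2d_prefixsum(prefix):
--     # element[i][j] = prefix[i][j] - prefix[i-1][j] - prefix[i][j-1] + prefix[i-1][j-1]
--     n, m = len(prefix), len(prefix[0])
--     nums = [[0 for _ in range(m)] for _ in range(n)]
--     nums[0][0] = prefix[0][0]
--     for i in range(n):
--         for j in range(m):
--             nums[i][j] = prefix[i][j] - (prefix[i-1][j] if i > 0 else 0) - (prefix[i][j-1] if j > 0 else 0) + (prefix[i-1][j-1] if i > 0 and j > 0 else 0)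
--     return nums
-- ===== SOURCE B (Python) =====
-- def recover_2d_prefixsum(prefix):
--     # Invert the 2D prefix sum by two 1D differencing passes:
--     # horizontal differences per row, then vertical differences per column.
--     m = len(prefix[0])
--     D = [[row[0]] + [row[j] - row[j - 1] for j in range(1, m)] for row in prefix]
--     return [D[0]] + [[c - p for p, c in zip(prev, cur)] for prev, cur in zip(D, D[1:])]
-- ===== Notes on version B (the rewrite author's own statement) =====
-- stated objective: alternative
-- what changed: Replaces A's single nested pass computing each cell by four-term inclusion-exclusion with two separate 1D differencing passes: horizontal differences along each row into an intermediate table D, then vertical differences between consecutive rows of D (zip of adjacent rows).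
import Mathlib
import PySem

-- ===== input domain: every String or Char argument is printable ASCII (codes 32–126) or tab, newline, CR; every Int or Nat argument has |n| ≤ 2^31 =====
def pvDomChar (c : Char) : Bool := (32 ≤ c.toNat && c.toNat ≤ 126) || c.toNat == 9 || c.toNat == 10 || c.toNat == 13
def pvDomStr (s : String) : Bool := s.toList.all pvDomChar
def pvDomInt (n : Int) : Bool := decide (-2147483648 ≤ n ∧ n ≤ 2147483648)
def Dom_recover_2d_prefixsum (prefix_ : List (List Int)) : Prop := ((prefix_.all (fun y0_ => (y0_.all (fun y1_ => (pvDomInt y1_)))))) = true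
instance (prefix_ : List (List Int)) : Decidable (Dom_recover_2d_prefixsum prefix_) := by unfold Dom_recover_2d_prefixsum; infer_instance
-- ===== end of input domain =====

-- B recovers the array by two 1D differencing passes (row differences, then column
-- differences on the intermediate table) instead of A's per-cell inclusion-exclusion;
-- objective: alternative decomposition, same asymptotic cost.

-- ===== PORT A =====
-- Literal port of A's nested fill loop as a map over the index ranges.
-- (A's dead initial write nums[0][0] = prefix[0][0] only matters when the first row is
-- empty, where it raises IndexError — excluded by Pre_.)
def recover_2d_prefixsum (prefix_ : List (List Int)) : List (List Int) :=
  let n := prefix_.length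
  let m := (prefix_.headD []).length
  (List.range n).map (fun i => (List.range m).map (fun j =>
    (prefix_.getD i []).getD j 0
      - (if 0 < i then (prefix_.getD (i - 1) []).getD j 0 else 0)
      - (if 0 < j then (prefix_.getD i []).getD (j - 1) 0 else 0)
      + (if 0 < i ∧ 0 < j then (prefix_.getD (i - 1) []).getD (j - 1) 0 else 0)))

-- ===== PORT B =====
-- horizontal pass: [row[0]] + [row[j] - row[j-1] for j in range(1, m)]
def pvDiffRow (m : Nat) (row : List Int) : List Int :=
  [row.getD 0 0] ++ (List.range' 1 (m - 1)).map (fun j => row.getD j 0 - row.getD (j - 1) 0)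

def recover_2d_prefixsum_alt (prefix_ : List (List Int)) : List (List Int) :=
  let m := (prefix_.headD []).length
  let D := prefix_.map (pvDiffRow m)
  match D with
  | [] => []
  | d0 :: rest =>
      -- [D[0]] + [[c - p for p, c in zip(prev, cur)] for prev, cur in zip(D, D[1:])]
      [d0] ++ (D.zip rest).map (fun pc => (pc.1.zip pc.2).map (fun x => x.2 - x.1))

-- ===== PRECONDITION & SPEC =====
-- Pre_ is exactly where Python A returns: A raises IndexError on an empty outer list,
-- on an empty first row (the initial write into nums), and on any later row shorter than
-- the first; B raises on exactly the same inputs.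
def Pre_recover_2d_prefixsum (prefix_ : List (List Int)) : Prop :=
  prefix_ ≠ [] ∧ 0 < (prefix_.headD []).length ∧
    ∀ row ∈ prefix_, (prefix_.headD []).length ≤ row.length
instance (prefix_ : List (List Int)) : Decidable (Pre_recover_2d_prefixsum prefix_) := by
  unfold Pre_recover_2d_prefixsum; infer_instance
def pvWitness_recover_2d_prefixsum : List (List Int) := [[1, 3], [4, 10]]

def Spec_recover_2d_prefixsum (prefix_ : List (List Int)) (out : List (List Int)) : Prop := out = recover_2d_prefixsum_alt prefix_
instance (prefix_ : List (List Int)) (out : List (List Int)) : Decidable (Spec_recover_2d_prefixsum prefix_ out) := by unfold Spec_recover_2d_prefixsum; infer_instance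

-- ===== CLAIM (what is proved, stated in full; the proofs are below) =====
def Claim_equal_recover_2d_prefixsum : Prop := ∀ (prefix_ : List (List Int)), Dom_recover_2d_prefixsum prefix_ → Pre_recover_2d_prefixsum prefix_ → Spec_recover_2d_prefixsum prefix_ (recover_2d_prefixsum prefix_)

-- ===== LEMMAS AND PROOFS =====

-- the horizontal pass as a single map over range m (for m ≥ 1)
theorem pvDiffRow_eq (m : Nat) (hm : 0 < m) (row : List Int) :
    pvDiffRow m row = (List.range m).map
      (fun j => if j = 0 then row.getD 0 0 else row.getD j 0 - row.getD (j - 1) 0) := by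
  obtain ⟨k, rfl⟩ : ∃ k, m = k + 1 := ⟨m - 1, by omega⟩
  simp [pvDiffRow, List.range_succ_eq_map, List.range'_eq_map_range,
        Function.comp, Nat.add_comm]

theorem recover_2d_prefixsum_spec_aux (prefix_ : List (List Int))
    (hPre : Pre_recover_2d_prefixsum prefix_) :
    recover_2d_prefixsum prefix_ = recover_2d_prefixsum_alt prefix_ := by
  obtain ⟨hne, hm, _⟩ := hPre
  obtain ⟨hd, tl, rfl⟩ := List.exists_cons_of_ne_nil hne
  simp only [List.headD_cons] at hm
  -- name the per-cell formula of A
  unfold recover_2d_prefixsum recover_2d_prefixsum_alt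
  simp only [List.headD_cons, List.map_cons]
  apply List.ext_getElem
  · simp
  · intro i h1 h2
    simp only [List.length_map, List.length_range, List.length_cons] at h1
    match i with
    | 0 =>
        -- first output row: A's row 0 vs D[0]
        simp only [List.singleton_append, List.getElem_map, List.getElem_range,
          List.getElem_cons_zero, List.length_cons]
        rw [pvDiffRow_eq _ hm]
        apply List.map_congr_left
        intro j hj
        rcases Nat.eq_zero_or_pos j with hj0 | hj0
        · subst hj0; simp
        · have hj' : ¬ j = 0 := by omega
          simp [hj', hj0]
    | k + 1 =>
        simp only [List.singleton_append, List.getElem_map, List.getElem_range,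
          List.getElem_cons_succ, List.getElem_zip]
        have hk : k < tl.length := by omega
        -- identify the zipped pair: D[k] and rest[k]
        have hD : ((pvDiffRow hd.length hd :: List.map (pvDiffRow hd.length) tl))[k]'(by
            simp; omega) = pvDiffRow hd.length ((hd :: tl).getD k []) := by
          match k with
          | 0 => simp
          | k' + 1 =>
              simp only [List.getElem_cons_succ, List.getElem_map, List.getD_cons_succ]
              rw [List.getD_eq_getElem _ _ (by omega)]
        have hgk : tl[k]'hk = tl.getD k [] := (List.getD_eq_getElem _ _ hk).symm
        rw [hD, hgk, pvDiffRow_eq _ hm, pvDiffRow_eq _ hm, List.zip_map',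
          List.map_map]
        apply List.map_congr_left
        intro j hj
        simp only [Function.comp]
        rcases Nat.eq_zero_or_pos j with hj0 | hj0
        · subst hj0; simp
        · have hj' : ¬ j = 0 := by omega
          simp only [hj', if_false, if_pos hj0, Nat.add_sub_cancel,
            List.getD_cons_succ, if_pos (Nat.succ_pos k),
            if_pos (And.intro (Nat.succ_pos k) hj0)]
          ring

-- ===== VERDICT (by name: the statement is the Claim_ definition above) =====
theorem recover_2d_prefixsum_spec : Claim_equal_recover_2d_prefixsum := by
  intro prefix_ _ hPre
  unfold Spec_recover_2d_prefixsum
  exact recover_2d_prefixsum_spec_aux prefix_ hPre
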